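-- pv_equiv track=rewrite | github.com/pwmcclung/newCodeProbs | min_turns.py | backwards
-- ===== SOURCE A (Python) =====
-- def backwards(x,y):
--     arr1 = [0,1,2,3,4,5,6,7,8,9]
--     arr2 = [0,1,2,3,4,5,6,7,8,9]
--     count2 = 0
--     while arr1.index(x) != arr2.index(y):
--         first = arr1.pop()
--         arr1.insert(0,first)
--         count2 += 1
--     return count2
-- ===== SOURCE B (Python) =====
-- def backwards(x, y):
--     return (y - x) % 10
-- ===== Notes on version B (the rewrite author's own statement) =====
-- stated objective: simpler
-- what changed: Replaced the rotate-and-recheck while loop over two digit lists with the closed form (y - x) % 10.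
-- outside the precondition, e.g. on backwards(10, 3): A raises ValueError, B returns 3
import Mathlib
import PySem

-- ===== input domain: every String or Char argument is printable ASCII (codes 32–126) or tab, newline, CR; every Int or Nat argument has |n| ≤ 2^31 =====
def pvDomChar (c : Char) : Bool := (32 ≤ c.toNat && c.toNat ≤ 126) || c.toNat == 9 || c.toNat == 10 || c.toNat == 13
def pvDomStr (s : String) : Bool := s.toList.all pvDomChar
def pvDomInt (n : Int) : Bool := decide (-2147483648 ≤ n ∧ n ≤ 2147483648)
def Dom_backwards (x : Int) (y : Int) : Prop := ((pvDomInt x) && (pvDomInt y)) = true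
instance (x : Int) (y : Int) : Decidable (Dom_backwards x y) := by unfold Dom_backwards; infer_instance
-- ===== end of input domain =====

-- B replaces A's rotate-and-recheck while loop with the closed form (y - x) % 10; objective: simpler.

-- ===== PORT A =====
-- fuel-bounded transcription of A's while loop: rotate arr1 right, count rotations;
-- fuel 10 suffices because on Pre_ the loop aligns within at most 9 rotations.
def backwardsLoop : Nat → List Int → Int → Int → Int → Int
  | 0, _, count2, _, _ => count2
  | fuel+1, arr1, count2, x, y =>
    if PySem.List.index? arr1 x ≠ PySem.List.index? [0,1,2,3,4,5,6,7,8,9] y then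
      match PySem.List.pop? arr1 (-1) with
      | some (first, rest) => backwardsLoop fuel (PySem.List.insert rest 0 first) (count2 + 1) x y
      | none => count2
    else count2

def backwards (x : Int) (y : Int) : Int :=
  backwardsLoop 10 [0,1,2,3,4,5,6,7,8,9] 0 x y

-- ===== PORT B =====
def backwards_alt (x : Int) (y : Int) : Int :=
  PySem.Int.mod (y - x) 10

-- ===== PRECONDITION & SPEC =====
-- Pre_ excludes exactly the inputs where A's list.index raises ValueError (x or y not a digit 0..9).
def Pre_backwards (x : Int) (y : Int) : Prop := 0 ≤ x ∧ x ≤ 9 ∧ 0 ≤ y ∧ y ≤ 9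
instance (x : Int) (y : Int) : Decidable (Pre_backwards x y) := by unfold Pre_backwards; infer_instance
def pvWitness_backwards : Int × Int := (2, 7)

def Spec_backwards (x : Int) (y : Int) (out : Int) : Prop := out = backwards_alt x y
instance (x : Int) (y : Int) (out : Int) : Decidable (Spec_backwards x y out) := by unfold Spec_backwards; infer_instance

-- ===== CLAIM (what is proved, stated in full; the proofs are below) =====
def Claim_equal_backwards : Prop := ∀ (x : Int) (y : Int), Dom_backwards x y → Pre_backwards x y → Spec_backwards x y (backwards x y)

-- ===== LEMMAS AND PROOFS =====

-- ===== VERDICT (by name: the statement is the Claim_ definition above) =====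
theorem backwards_spec : Claim_equal_backwards := by
  intro x y _ hp
  obtain ⟨hx0, hx9, hy0, hy9⟩ := hp
  unfold Spec_backwards
  interval_cases x <;> interval_cases y <;> decide
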